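-- pv_equiv track=rewrite | github.com/Daniel-Raj/speech-to-text-to-command | main.py | strip_inside_quotes
-- ===== SOURCE A (Python) =====
-- def strip_inside_quotes(cmd):
--     final_command = ''
--     s = False
--     for i, v in enumerate(cmd):
--             if v == "'" or v == '"':
--                 final_command += v
--                 if s == False:
--                     s = True
--                 else:
--                     s = False
--             elif s == True and v.isspace() == True:
--                 continue
--             else:
--                 final_command += v
--     return final_command
-- ===== SOURCE B (Python) =====
-- import re
--
-- def strip_inside_quotes(cmd):
--     # Split cmd into alternating [text, quote, text, quote, ..., text] tokens;
--     # a text token at even index i is inside quotes exactly when (i // 2) is odd.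
--     parts = re.split(r"(['\"])", cmd)
--     out = []
--     for i, p in enumerate(parts):
--         if i % 2 == 1:
--             out.append(p)  # the quote character itself
--         elif (i // 2) % 2 == 1:
--             out.append(''.join(c for c in p if not c.isspace()))
--         else:
--             out.append(p)
--     return ''.join(out)
-- ===== Notes on version B (the rewrite author's own statement) =====
-- stated objective: faster
-- what changed: Replaces A's per-character Python loop (toggling in-quotes flag, building by repeated string +=) with a regex split on quote characters into alternating text/quote tokens, where a text token's index parity (i//2 odd) decides whether its whitespace is removed, concatenated with one join.
import Mathlib
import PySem

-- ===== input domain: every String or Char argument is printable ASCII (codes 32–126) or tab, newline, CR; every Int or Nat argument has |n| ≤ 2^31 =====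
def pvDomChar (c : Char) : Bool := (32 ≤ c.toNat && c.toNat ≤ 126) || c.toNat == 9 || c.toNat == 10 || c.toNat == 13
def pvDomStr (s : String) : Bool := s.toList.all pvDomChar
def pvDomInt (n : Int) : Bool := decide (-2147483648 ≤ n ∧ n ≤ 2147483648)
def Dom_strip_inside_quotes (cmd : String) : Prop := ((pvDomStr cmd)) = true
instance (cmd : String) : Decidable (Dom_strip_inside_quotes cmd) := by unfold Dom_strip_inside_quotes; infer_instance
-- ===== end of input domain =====

-- B replaces A's single char-loop with a toggling flag by a split-on-quotes decomposition
-- (tokens processed by index parity), concatenated once; objective: faster (measured).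

-- ===== PORT A =====
-- A: one pass over cmd, flag s toggles at every quote; inside quotes whitespace is skipped.
def strip_inside_quotes (cmd : String) : String :=
  let r := cmd.toList.foldl
    (fun (st : List Char × Bool) v =>
      if v = '\'' ∨ v = '"' then
        (st.1 ++ [v], if st.2 = false then true else false)
      else if st.2 = true ∧ PySem.Chars.isspace v = true then
        st
      else
        (st.1 ++ [v], st.2))
    ([], false)
  String.mk r.1

-- ===== PORT B =====
-- re.split(r"(['\"])", cmd): alternating text/quote tokens (text first and last).
def pvSplitQuotes : List Char → List (List Char)
  | [] => [[]]
  | c :: rest =>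
    if c = '\'' ∨ c = '"' then
      [] :: [c] :: pvSplitQuotes rest
    else
      match pvSplitQuotes rest with
      | t :: ts => (c :: t) :: ts
      | [] => [[c]]   -- unreachable: pvSplitQuotes never returns []

-- the enumerate loop of Source B: token index i decides quote / inside / outside.
def pvProcTokens : Nat → List (List Char) → List Char
  | _, [] => []
  | i, p :: ps =>
    (if i % 2 = 1 then p
     else if (i / 2) % 2 = 1 then p.filter (fun c => !(PySem.Chars.isspace c))
     else p) ++ pvProcTokens (i + 1) ps

def strip_inside_quotes_alt (cmd : String) : String :=
  String.mk (pvProcTokens 0 (pvSplitQuotes cmd.toList))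

-- ===== PRECONDITION & SPEC =====
def Spec_strip_inside_quotes (cmd : String) (out : String) : Prop := out = strip_inside_quotes_alt cmd
instance (cmd : String) (out : String) : Decidable (Spec_strip_inside_quotes cmd out) := by unfold Spec_strip_inside_quotes; infer_instance

-- ===== CLAIM (what is proved, stated in full; the proofs are below) =====
def Claim_equal_strip_inside_quotes : Prop := ∀ (cmd : String), Dom_strip_inside_quotes cmd → Spec_strip_inside_quotes cmd (strip_inside_quotes cmd)

-- ===== LEMMAS AND PROOFS =====

-- Reference recursion both ports are reduced to: keep quotes (flipping s), drop whitespace while s.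
def pvSpecF : Bool → List Char → List Char
  | _, [] => []
  | s, c :: cs =>
    if c = '\'' ∨ c = '"' then c :: pvSpecF (!s) cs
    else if s = true ∧ PySem.Chars.isspace c = true then pvSpecF s cs
    else c :: pvSpecF s cs

lemma pvFoldlA (cs : List Char) : ∀ (acc : List Char) (s : Bool),
    (cs.foldl
      (fun (st : List Char × Bool) v =>
        if v = '\'' ∨ v = '"' then
          (st.1 ++ [v], if st.2 = false then true else false)
        else if st.2 = true ∧ PySem.Chars.isspace v = true then
          st
        else
          (st.1 ++ [v], st.2))
      (acc, s)).1 = acc ++ pvSpecF s cs := by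
  induction cs with
  | nil => intro acc s; simp [pvSpecF]
  | cons c cs ih =>
    intro acc s
    simp only [List.foldl_cons]
    by_cases h1 : c = '\'' ∨ c = '"'
    · cases s
      · simpa [pvSpecF, h1] using ih (acc ++ [c]) true
      · simpa [pvSpecF, h1] using ih (acc ++ [c]) false
    · by_cases h2 : s = true ∧ PySem.Chars.isspace c = true
      · simpa [pvSpecF, h1, h2] using ih acc s
      · simpa [pvSpecF, h1, h2] using ih (acc ++ [c]) s

lemma pvSplitQuotes_ne_nil (cs : List Char) : pvSplitQuotes cs ≠ [] := by
  cases cs with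
  | nil => simp [pvSplitQuotes]
  | cons c rest =>
    simp only [pvSplitQuotes]
    split_ifs
    · simp
    · cases h : pvSplitQuotes rest <;> simp

lemma pvProcSplit (cs : List Char) : ∀ (i : Nat), i % 2 = 0 →
    pvProcTokens i (pvSplitQuotes cs) = pvSpecF (decide ((i / 2) % 2 = 1)) cs := by
  induction cs with
  | nil =>
    intro i hi
    simp only [pvSplitQuotes, pvProcTokens, pvSpecF, List.filter_nil]
    split_ifs <;> simp
  | cons c cs ih =>
    intro i hi
    simp only [pvSplitQuotes]
    split_ifs with hq
    · -- quote: empty text token, quote token, recurse at i + 2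
      have h1 : (i + 1) % 2 = 1 := by omega
      have h2 : (i + 2) % 2 = 0 := by omega
      have hflip : (decide (((i + 2) / 2) % 2 = 1)) = !(decide ((i / 2) % 2 = 1)) := by
        rw [show (i + 2) / 2 = i / 2 + 1 from by omega]
        by_cases h : (i / 2) % 2 = 1
        · rw [show (i / 2 + 1) % 2 = 0 from by omega, h]
          decide
        · rw [show (i / 2 + 1) % 2 = 1 from by omega,
              show (i / 2) % 2 = 0 from by omega]
          decide
      simp only [pvProcTokens, pvSpecF, hq, if_pos, hi, h1, ih (i + 2) h2, hflip]
      simp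
    · -- non-quote: prepend c to the first text token
      obtain ⟨t, ts, ht⟩ : ∃ t ts, pvSplitQuotes cs = t :: ts := by
        cases h : pvSplitQuotes cs with
        | nil => exact absurd h (pvSplitQuotes_ne_nil cs)
        | cons t ts => exact ⟨t, ts, rfl⟩
      have hih := ih i hi
      rw [ht] at hih ⊢
      simp only [pvProcTokens] at hih ⊢
      have hi1 : ¬ (i % 2 = 1) := by omega
      by_cases hin : (i / 2) % 2 = 1
      · have hd : decide ((i / 2) % 2 = 1) = true := decide_eq_true hin
        rw [hd] at hih ⊢
        simp only [if_neg hi1, if_pos hin] at hih ⊢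
        simp only [pvSpecF, if_neg hq]
        by_cases hw : PySem.Chars.isspace c = true
        · simp [hw, hih]
        · simp [hw, hih]
      · have hd : decide ((i / 2) % 2 = 1) = false := decide_eq_false hin
        rw [hd] at hih ⊢
        simp only [if_neg hi1, if_neg hin] at hih ⊢
        simp [pvSpecF, if_neg hq, hih]

-- ===== VERDICT (by name: the statement is the Claim_ definition above) =====
theorem strip_inside_quotes_spec : Claim_equal_strip_inside_quotes := by
  intro cmd _
  show String.mk (cmd.toList.foldl
      (fun (st : List Char × Bool) v =>
        if v = '\'' ∨ v = '"' then
          (st.1 ++ [v], if st.2 = false then true else false)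
        else if st.2 = true ∧ PySem.Chars.isspace v = true then
          st
        else
          (st.1 ++ [v], st.2))
      ([], false)).1 = strip_inside_quotes_alt cmd
  rw [pvFoldlA cmd.toList [] false]
  unfold strip_inside_quotes_alt
  rw [pvProcSplit cmd.toList 0 rfl]
  simp
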